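-- pv_equiv track=rewrite | github.com/Julien-G-Man/lamla-ai | backend/apps/chatbot/helpers.py | _derive_session_title
-- ===== SOURCE A (Python) =====
-- def _derive_session_title(user_message: str) -> str:
--     text = (user_message or "").strip().replace("\n", " ")
--     if not text:
--         return "New chat"
--
--     sentence_end = len(text)
--     for separator in (". ", "? ", "! ", ".", "?", "!"):
--         index = text.find(separator)
--         if index != -1:
--             sentence_end = min(sentence_end, index + (0 if separator in {'.', '?', '!'} else 1))
--
--     title = text[:sentence_end].strip().strip('"\'')
--     if len(title) > 120:
--         title = title[:117].rstrip() + "..."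
--     return title or "New chat"
-- ===== SOURCE B (Python) =====
-- def _derive_session_title(user_message: str) -> str:
--     text = (user_message or "").strip().replace("\n", " ")
--     if not text:
--         return "New chat"
--
--     # First index of a sentence terminator; the char itself is excluded.
--     for i, ch in enumerate(text):
--         if ch in ".?!":
--             sentence_end = i
--             break
--     else:
--         sentence_end = len(text)
--
--     title = text[:sentence_end].strip().strip('"\'')
--     if len(title) > 120:
--         title = title[:117].rstrip() + "..."
--     return title or "New chat"
-- ===== Notes on version B (the rewrite author's own statement) =====
-- stated objective: simpler
-- what changed: Replaces A's six-separator find/min loop (which searches the string once per separator, including redundant two-char variants) by a single left-to-right scan that stops at the first '.', '?' or '!'; the strip/truncate/fallback tail is unchanged.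
import Mathlib
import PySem

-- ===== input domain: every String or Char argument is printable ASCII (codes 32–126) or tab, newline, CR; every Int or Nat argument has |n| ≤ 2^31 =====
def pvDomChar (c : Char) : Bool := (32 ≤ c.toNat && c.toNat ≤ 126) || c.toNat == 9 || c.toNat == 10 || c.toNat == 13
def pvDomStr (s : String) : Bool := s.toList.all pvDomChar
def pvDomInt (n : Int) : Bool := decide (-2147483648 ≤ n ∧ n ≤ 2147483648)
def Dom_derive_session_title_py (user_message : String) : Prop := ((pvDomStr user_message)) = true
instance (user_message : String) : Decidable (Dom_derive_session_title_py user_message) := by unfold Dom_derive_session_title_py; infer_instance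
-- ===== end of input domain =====

-- B replaces A's six-separator find/min loop by a single left-to-right scan for the
-- first '.', '?' or '!' (simpler; the rest of the function is unchanged).

-- ===== PORT A =====
-- A's loop over ("." , "? ", … ): foldl over the six separator strings, keeping the min.
-- ((user_message or "") = user_message for strings; the 'or ""' only maps "" to "".)
def derive_session_title_py (user_message : String) : String :=
  let text := PySem.Chars.replace (PySem.Chars.strip user_message.toList) ['\n'] [' ']
  if text = [] then "New chat" else
  let sentence_end : Int :=
    [['.',' '], ['?',' '], ['!',' '], ['.'], ['?'], ['!']].foldl
      (fun se sep =>
        let index := PySem.Chars.find text sep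
        if index ≠ -1 then
          min se (index + (if sep = ['.'] ∨ sep = ['?'] ∨ sep = ['!'] then 0 else 1))
        else se)
      (text.length : Int)
  let title := PySem.Chars.stripChars (PySem.Chars.strip (PySem.List.slice text none (some sentence_end))) ['"', '\'']
  let title := if title.length > 120 then PySem.Chars.rstrip (PySem.List.slice title none (some 117)) ++ ['.', '.', '.'] else title
  if title = [] then "New chat" else String.ofList title

-- ===== PORT B =====
-- Source B's for/else scan: index of the first '.', '?' or '!', defaulting to len(text).
def firstTerminator : List Char → Nat
  | [] => 0
  | c :: rest => if c = '.' ∨ c = '?' ∨ c = '!' then 0 else firstTerminator rest + 1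

def derive_session_title_py_alt (user_message : String) : String :=
  let text := PySem.Chars.replace (PySem.Chars.strip user_message.toList) ['\n'] [' ']
  if text = [] then "New chat" else
  let sentence_end := firstTerminator text
  let title := PySem.Chars.stripChars (PySem.Chars.strip (text.take sentence_end)) ['"', '\'']
  let title := if title.length > 120 then PySem.Chars.rstrip (title.take 117) ++ ['.', '.', '.'] else title
  if title = [] then "New chat" else String.ofList title

-- ===== PRECONDITION & SPEC =====
def Spec_derive_session_title_py (user_message : String) (out : String) : Prop := out = derive_session_title_py_alt user_message
instance (user_message : String) (out : String) : Decidable (Spec_derive_session_title_py user_message out) := by unfold Spec_derive_session_title_py; infer_instance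

-- ===== CLAIM (what is proved, stated in full; the proofs are below) =====
def Claim_equal_derive_session_title_py : Prop := ∀ (user_message : String), Dom_derive_session_title_py user_message → Spec_derive_session_title_py user_message (derive_session_title_py user_message)

-- ===== LEMMAS AND PROOFS =====

theorem firstTerminator_le (l : List Char) : firstTerminator l ≤ l.length := by
  induction l with
  | nil => simp [firstTerminator]
  | cons c rest ih =>
    simp only [firstTerminator, List.length_cons]
    split_ifs <;> omega

theorem firstTerminator_not_before (l : List Char) (k : Nat) (hk : k < firstTerminator l)
    (c : Char) (hc : c = '.' ∨ c = '?' ∨ c = '!') : ¬ ([c] <+: l.drop k) := by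
  induction l generalizing k with
  | nil => simp [firstTerminator] at hk
  | cons x rest ih =>
    simp only [firstTerminator] at hk
    split_ifs at hk with hx
    · omega
    · cases k with
      | zero =>
        simp only [List.drop_zero]
        intro hpre
        rcases (List.cons_prefix_cons.mp hpre) with ⟨rfl, -⟩
        exact hx hc
      | succ j =>
        simpa using ih j (by omega)

theorem firstTerminator_hit (l : List Char) (h : firstTerminator l < l.length) :
    ∃ c, (c = '.' ∨ c = '?' ∨ c = '!') ∧ [c] <+: l.drop (firstTerminator l) := by
  induction l with
  | nil => simp at h
  | cons x rest ih =>
    simp only [firstTerminator] at h ⊢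
    split_ifs with hx
    · exact ⟨x, hx, by simp [List.cons_prefix_cons]⟩
    · simpa using ih (by simpa [List.length_cons] using Nat.lt_of_succ_lt_succ (by simpa [firstTerminator, hx] using h))

-- A single-character find for a terminator char is -1 or lands at/after the first terminator.
theorem find_term_single (text : List Char) (c : Char) (hc : c = '.' ∨ c = '?' ∨ c = '!') :
    PySem.Chars.find text [c] = -1 ∨
      (firstTerminator text : Int) ≤ PySem.Chars.find text [c] := by
  by_cases hne : PySem.Chars.find text [c] = -1
  · exact Or.inl hne
  · right
    have hinf := (PySem.Chars.find_ne_neg_one_iff text [c]).mp hne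
    have h0 : 0 ≤ PySem.Chars.find text [c] := (PySem.Chars.find_nonneg_iff text [c]).mpr hinf
    obtain ⟨hpre, -⟩ := PySem.Chars.find_spec h0
    have hge : firstTerminator text ≤ (PySem.Chars.find text [c]).toNat := by
      by_contra hlt
      exact firstTerminator_not_before text _ (by omega) c hc hpre
    omega

-- A two-character find ".␣"/"?␣"/"!␣" is -1 or lands at/after the first terminator.
theorem find_term_double (text : List Char) (c : Char) (hc : c = '.' ∨ c = '?' ∨ c = '!') :
    PySem.Chars.find text [c, ' '] = -1 ∨
      (firstTerminator text : Int) ≤ PySem.Chars.find text [c, ' '] := by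
  by_cases hne : PySem.Chars.find text [c, ' '] = -1
  · exact Or.inl hne
  · right
    have hinf := (PySem.Chars.find_ne_neg_one_iff text [c, ' ']).mp hne
    have h0 : 0 ≤ PySem.Chars.find text [c, ' '] := (PySem.Chars.find_nonneg_iff text [c, ' ']).mpr hinf
    obtain ⟨hpre, -⟩ := PySem.Chars.find_spec h0
    have hpre1 : [c] <+: text.drop (PySem.Chars.find text [c, ' ']).toNat :=
      List.IsPrefix.trans ⟨[' '], rfl⟩ hpre
    have hge : firstTerminator text ≤ (PySem.Chars.find text [c, ' ']).toNat := by
      by_contra hlt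
      exact firstTerminator_not_before text _ (by omega) c hc hpre1
    omega

-- If the char at the first-terminator position is c, then find text [c] is exactly that position.
theorem find_term_single_eq (text : List Char) (c : Char) (hc : c = '.' ∨ c = '?' ∨ c = '!')
    (hhit : [c] <+: text.drop (firstTerminator text)) :
    PySem.Chars.find text [c] = (firstTerminator text : Int) := by
  have hinf : [c] <:+: text := List.infix_iff_prefix_suffix.mpr
    ⟨_, hhit, List.drop_suffix _ _⟩
  have h0 : 0 ≤ PySem.Chars.find text [c] := (PySem.Chars.find_nonneg_iff text [c]).mpr hinf
  obtain ⟨-, hmin⟩ := PySem.Chars.find_spec h0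
  rcases find_term_single text c hc with hneg | hge
  · omega
  · have hle : (PySem.Chars.find text [c]).toNat ≤ firstTerminator text := by
      by_contra hlt
      exact hmin (firstTerminator text) (by omega) hhit
    omega

-- The six-separator min-loop of A computes exactly B's first-terminator index.
-- one min/if step for a two-character separator keeps the accumulator between m and its old value
theorem dstep (m acc d : Int) (hd : d = -1 ∨ m ≤ d) (hacc : m ≤ acc) :
    m ≤ (if d ≠ -1 then min acc (d + 1) else acc) ∧ (if d ≠ -1 then min acc (d + 1) else acc) ≤ acc := by
  split_ifs with h
  · refine ⟨?_, min_le_left _ _⟩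
    rcases hd with rfl | hd
    · exact absurd rfl h
    · exact le_min hacc (by omega)
  · exact ⟨hacc, le_rfl⟩

-- one min/if step for a single-character separator; if its find equals m it pins the accumulator to m
theorem sstep (m acc s : Int) (hm0 : 0 ≤ m) (hs : s = -1 ∨ m ≤ s) (hacc : m ≤ acc) :
    m ≤ (if s ≠ -1 then min acc s else acc) ∧ (if s ≠ -1 then min acc s else acc) ≤ acc ∧
      (s = m → (if s ≠ -1 then min acc s else acc) ≤ m) := by
  split_ifs with h
  · refine ⟨?_, min_le_left _ _, ?_⟩
    · rcases hs with rfl | hs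
      · exact absurd rfl h
      · exact le_min hacc hs
    · intro he; rw [he]; exact min_le_right _ _
  · have h' := not_not.mp h
    exact ⟨hacc, le_rfl, fun he => by omega⟩

-- the six-step min chain of A, abstracted over the six find results
theorem minChain (n m d1 d2 d3 s1 s2 s3 a1 a2 a3 a4 a5 a6 : Int) (hm0 : 0 ≤ m) (hmn : m ≤ n)
    (hd1 : d1 = -1 ∨ m ≤ d1) (hd2 : d2 = -1 ∨ m ≤ d2) (hd3 : d3 = -1 ∨ m ≤ d3)
    (hs1 : s1 = -1 ∨ m ≤ s1) (hs2 : s2 = -1 ∨ m ≤ s2) (hs3 : s3 = -1 ∨ m ≤ s3)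
    (hhit : m < n → s1 = m ∨ s2 = m ∨ s3 = m)
    (e1 : a1 = if d1 ≠ -1 then min n (d1 + 1) else n)
    (e2 : a2 = if d2 ≠ -1 then min a1 (d2 + 1) else a1)
    (e3 : a3 = if d3 ≠ -1 then min a2 (d3 + 1) else a2)
    (e4 : a4 = if s1 ≠ -1 then min a3 s1 else a3)
    (e5 : a5 = if s2 ≠ -1 then min a4 s2 else a4)
    (e6 : a6 = if s3 ≠ -1 then min a5 s3 else a5) : a6 = m := by
  have h1 := dstep m n d1 hd1 hmn; rw [← e1] at h1
  have h2 := dstep m a1 d2 hd2 h1.1; rw [← e2] at h2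
  have h3 := dstep m a2 d3 hd3 h2.1; rw [← e3] at h3
  have h4 := sstep m a3 s1 hm0 hs1 h3.1; rw [← e4] at h4
  have h5 := sstep m a4 s2 hm0 hs2 h4.1; rw [← e5] at h5
  have h6 := sstep m a5 s3 hm0 hs3 h5.1; rw [← e6] at h6
  refine le_antisymm ?_ h6.1
  by_cases hc : m < n
  · rcases hhit hc with he | he | he
    · have := h4.2.2 he
      have := h5.2.1; have := h6.2.1; omega
    · have := h5.2.2 he
      have := h6.2.1; omega
    · exact h6.2.2 he
  · have := h1.2; have := h2.2; have := h3.2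
    have := h4.2.1; have := h5.2.1; have := h6.2.1; omega

-- The six-separator min-loop of A computes exactly B's first-terminator index.
theorem sentEnd_eq (text : List Char) :
    ([['.',' '], ['?',' '], ['!',' '], ['.'], ['?'], ['!']].foldl
      (fun se sep =>
        let index := PySem.Chars.find text sep
        if index ≠ -1 then
          min se (index + (if sep = ['.'] ∨ sep = ['?'] ∨ sep = ['!'] then 0 else 1))
        else se)
      (text.length : Int)) = (firstTerminator text : Int) := by
  have hm0 : (0 : Int) ≤ (firstTerminator text : Int) := Int.natCast_nonneg _
  have hle : (firstTerminator text : Int) ≤ (text.length : Int) := by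
    exact_mod_cast firstTerminator_le text
  have hd1 := find_term_double text '.' (Or.inl rfl)
  have hd2 := find_term_double text '?' (Or.inr (Or.inl rfl))
  have hd3 := find_term_double text '!' (Or.inr (Or.inr rfl))
  have hs1 := find_term_single text '.' (Or.inl rfl)
  have hs2 := find_term_single text '?' (Or.inr (Or.inl rfl))
  have hs3 := find_term_single text '!' (Or.inr (Or.inr rfl))
  have hhit : (firstTerminator text : Int) < (text.length : Int) →
      PySem.Chars.find text ['.'] = (firstTerminator text : Int) ∨
      PySem.Chars.find text ['?'] = (firstTerminator text : Int) ∨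
      PySem.Chars.find text ['!'] = (firstTerminator text : Int) := by
    intro h
    obtain ⟨c, hc, hpre⟩ := firstTerminator_hit text (by exact_mod_cast h)
    rcases hc with rfl | rfl | rfl
    · exact Or.inl (find_term_single_eq text _ (Or.inl rfl) hpre)
    · exact Or.inr (Or.inl (find_term_single_eq text _ (Or.inr (Or.inl rfl)) hpre))
    · exact Or.inr (Or.inr (find_term_single_eq text _ (Or.inr (Or.inr rfl)) hpre))
  have c1 : (if (['.',' '] : List Char) = ['.'] ∨ (['.',' '] : List Char) = ['?'] ∨ (['.',' '] : List Char) = ['!'] then (0:Int) else 1) = 1 := by decide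
  have c2 : (if (['?',' '] : List Char) = ['.'] ∨ (['?',' '] : List Char) = ['?'] ∨ (['?',' '] : List Char) = ['!'] then (0:Int) else 1) = 1 := by decide
  have c3 : (if (['!',' '] : List Char) = ['.'] ∨ (['!',' '] : List Char) = ['?'] ∨ (['!',' '] : List Char) = ['!'] then (0:Int) else 1) = 1 := by decide
  simp only [List.foldl_cons, List.foldl_nil, c1, c2, c3, true_or, or_true, if_true, add_zero]
  apply minChain (text.length : Int) (firstTerminator text : Int)
    (PySem.Chars.find text ['.',' ']) (PySem.Chars.find text ['?',' ']) (PySem.Chars.find text ['!',' '])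
    (PySem.Chars.find text ['.']) (PySem.Chars.find text ['?']) (PySem.Chars.find text ['!'])
    _ _ _ _ _ _ hm0 hle hd1 hd2 hd3 hs1 hs2 hs3 hhit <;> rfl

-- ===== VERDICT (by name: the statement is the Claim_ definition above) =====
theorem derive_session_title_py_spec : Claim_equal_derive_session_title_py := by
  intro user_message _
  show derive_session_title_py user_message = derive_session_title_py_alt user_message
  unfold derive_session_title_py derive_session_title_py_alt
  set text := PySem.Chars.replace (PySem.Chars.strip user_message.toList) ['\n'] [' '] with htext
  by_cases hnil : text = []
  · simp [hnil]
  · simp only [hnil, if_false]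
    rw [sentEnd_eq text, PySem.List.slice_to_natCast,
        show (117 : Int) = ((117 : Nat) : Int) from rfl, PySem.List.slice_to_natCast]
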